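-- pv_equiv track=rewrite | github.com/kellen-sun/Contests | CCC Junior/CCC Junior 2001/j3.py | add_points
-- ===== SOURCE A (Python) =====
-- def add_points(clubs, c_points):
--     for x in range(len(clubs)):
--         if clubs[x]=='A':
--             c_points+=4
--         elif clubs[x]=='K':
--             c_points+=3
--         elif clubs[x]=='Q':
--             c_points+=2
--         elif clubs[x]=='J':
--             c_points+=1
--     return c_points
-- ===== SOURCE B (Python) =====
-- def add_points(clubs, c_points):
--     return (c_points
--             + 4 * clubs.count('A')
--             + 3 * clubs.count('K')
--             + 2 * clubs.count('Q')
--             + clubs.count('J'))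
-- ===== Notes on version B (the rewrite author's own statement) =====
-- stated objective: simpler
-- what changed: Replaces the indexed loop with its if-elif accumulator by a closed-form expression combining four str.count scans, one per honour letter.
import Mathlib
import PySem

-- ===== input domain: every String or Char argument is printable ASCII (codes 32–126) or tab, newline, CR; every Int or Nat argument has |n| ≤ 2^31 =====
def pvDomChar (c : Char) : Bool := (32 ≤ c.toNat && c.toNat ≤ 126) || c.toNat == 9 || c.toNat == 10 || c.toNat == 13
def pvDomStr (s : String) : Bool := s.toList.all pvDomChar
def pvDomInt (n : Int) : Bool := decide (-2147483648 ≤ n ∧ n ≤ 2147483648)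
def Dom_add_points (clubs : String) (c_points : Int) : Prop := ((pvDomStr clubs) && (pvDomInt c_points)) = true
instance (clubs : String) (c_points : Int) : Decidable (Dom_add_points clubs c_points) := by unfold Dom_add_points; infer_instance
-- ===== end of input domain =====

-- B replaces A's indexed if-elif loop with a closed-form sum of four per-letter count scans (objective: simpler).

-- ===== PORT A =====
-- A iterates x over range(len(clubs)) and reads clubs[x]; this visits exactly the characters in order.
def add_points (clubs : String) (c_points : Int) : Int :=
  clubs.toList.foldl
    (fun c ch =>
      if ch = 'A' then c + 4
      else if ch = 'K' then c + 3
      else if ch = 'Q' then c + 2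
      else if ch = 'J' then c + 1
      else c)
    c_points

-- ===== PORT B =====
def add_points_alt (clubs : String) (c_points : Int) : Int :=
  c_points
    + 4 * (PySem.Str.count clubs "A" : Int)
    + 3 * (PySem.Str.count clubs "K" : Int)
    + 2 * (PySem.Str.count clubs "Q" : Int)
    + (PySem.Str.count clubs "J" : Int)

-- ===== PRECONDITION & SPEC =====
def Spec_add_points (clubs : String) (c_points : Int) (out : Int) : Prop := out = add_points_alt clubs c_points
instance (clubs : String) (c_points : Int) (out : Int) : Decidable (Spec_add_points clubs c_points out) := by unfold Spec_add_points; infer_instance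

-- ===== CLAIM (what is proved, stated in full; the proofs are below) =====
def Claim_equal_add_points : Prop := ∀ (clubs : String) (c_points : Int), Dom_add_points clubs c_points → Spec_add_points clubs c_points (add_points clubs c_points)

-- ===== LEMMAS AND PROOFS =====

-- PySem.Chars.count of a single-character pattern is the character count.
theorem chars_count_go_single (c : Char) : ∀ (fuel : Nat) (l : List Char) (acc : Nat), l.length ≤ fuel →
    PySem.Chars.count.go [c] fuel l acc = acc + l.count c := by
  intro fuel
  induction fuel with
  | zero =>
    intro l acc h
    have : l = [] := List.eq_nil_of_length_eq_zero (Nat.le_zero.mp h)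
    subst this; simp [PySem.Chars.count.go]
  | succ n ih =>
    intro l acc h
    cases l with
    | nil => simp [PySem.Chars.count.go]
    | cons x t =>
      rw [PySem.Chars.count.go]
      by_cases hx : x = c
      · subst hx
        simp [List.isPrefixOf, ih t (acc + 1) (by simpa using h)]
        omega
      · simp [List.isPrefixOf, hx, Ne.symm hx, ih t acc (by simpa using h)]

theorem chars_count_single (s : List Char) (c : Char) : PySem.Chars.count s [c] = s.count c := by
  simp [PySem.Chars.count, chars_count_go_single c s.length s 0 le_rfl]

-- A's loop computes the closed form over the remaining characters.
theorem foldl_honours (l : List Char) (c : Int) :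
    l.foldl
      (fun c ch =>
        if ch = 'A' then c + 4
        else if ch = 'K' then c + 3
        else if ch = 'Q' then c + 2
        else if ch = 'J' then c + 1
        else c)
      c
    = c + 4 * (l.count 'A' : Int) + 3 * (l.count 'K' : Int)
        + 2 * (l.count 'Q' : Int) + (l.count 'J' : Int) := by
  induction l generalizing c with
  | nil => simp
  | cons x t ih =>
    simp only [List.foldl_cons, ih, List.count_cons]
    by_cases hA : x = 'A'
    · subst hA; simp; ring
    · by_cases hK : x = 'K'
      · subst hK; simp; ring
      · by_cases hQ : x = 'Q'
        · subst hQ; simp_all; ring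
        · by_cases hJ : x = 'J'
          · subst hJ; simp_all; ring
          · simp_all

-- ===== VERDICT (by name: the statement is the Claim_ definition above) =====
theorem add_points_spec : Claim_equal_add_points := by
  intro clubs c_points _
  unfold Spec_add_points add_points add_points_alt
  simp only [PySem.Str.count_eq,
    show ("A".toList : List Char) = ['A'] from rfl,
    show ("K".toList : List Char) = ['K'] from rfl,
    show ("Q".toList : List Char) = ['Q'] from rfl,
    show ("J".toList : List Char) = ['J'] from rfl,
    chars_count_single]
  exact foldl_honours clubs.toList c_points
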